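-- pv_equiv track=rewrite | github.com/Nikolay-Lysenko/dodecaphony | dodecaphony/music_theory.py | transpose_tone_row
-- ===== SOURCE A (Python) =====
-- N_SEMITONES_PER_OCTAVE = 12
--
-- PITCH_CLASS_TO_POSITION = {
--     'C': 0, 'C#': 1, 'D': 2, 'D#': 3, 'E': 4, 'F': 5,
--     'F#': 6, 'G': 7, 'G#': 8, 'A': 9, 'A#': 10, 'B': 11
-- }
--
-- POSITION_TO_PITCH_CLASS = {v: k for k, v in PITCH_CLASS_TO_POSITION.items()}
--
-- def transpose_tone_row(tone_row: list[str], shift_in_semitones: int) -> list[str]: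
--     """
--     Transpose tone row.
--
--     :param tone_row:
--         tone row as list of pitch classes (like C or C#, flats are not allowed)
--     :param shift_in_semitones:
--         transposition interval in semitones
--     :return:
--         transposed tone row
--     """
--     transposed_tone_row = []
--     for pitch_class in tone_row:
--         new_position = (PITCH_CLASS_TO_POSITION[pitch_class] + shift_in_semitones)
--         new_position %= N_SEMITONES_PER_OCTAVE
--         new_pitch_class = POSITION_TO_PITCH_CLASS[new_position]
--         transposed_tone_row.append(new_pitch_class)
--     return transposed_tone_row
-- ===== SOURCE B (Python) =====
-- N_SEMITONES_PER_OCTAVE = 12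
--
-- NATURAL_TO_POSITION = {'C': 0, 'D': 2, 'E': 4, 'F': 5, 'G': 7, 'A': 9, 'B': 11}
-- POSITION_TO_NATURAL = {0: 'C', 2: 'D', 4: 'E', 5: 'F', 7: 'G', 9: 'A', 11: 'B'}
--
-- def transpose_tone_row(tone_row: list[str], shift_in_semitones: int) -> list[str]:
--     """Transpose by letter arithmetic: position = semitone value of the note letter
--     plus the number of sharps; the new name is rebuilt from the black-key test."""
--     result = []
--     for pitch_class in tone_row:
--         position = NATURAL_TO_POSITION[pitch_class[0]] + pitch_class.count('#')
--         position = (position + shift_in_semitones) % N_SEMITONES_PER_OCTAVE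
--         if position in POSITION_TO_NATURAL:
--             result.append(POSITION_TO_NATURAL[position])
--         else:
--             result.append(POSITION_TO_NATURAL[position - 1] + '#')
--     return result
-- ===== Notes on version B (the rewrite author's own statement) =====
-- stated objective: alternative
-- what changed: B computes each position arithmetically from the note's spelling (semitone value of the letter plus the count of '#') and rebuilds the transposed name from the black-key test (natural letter, or previous letter plus '#'), instead of A's lookups in the 12-entry name-to-position and position-to-name tables.
import Mathlib
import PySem

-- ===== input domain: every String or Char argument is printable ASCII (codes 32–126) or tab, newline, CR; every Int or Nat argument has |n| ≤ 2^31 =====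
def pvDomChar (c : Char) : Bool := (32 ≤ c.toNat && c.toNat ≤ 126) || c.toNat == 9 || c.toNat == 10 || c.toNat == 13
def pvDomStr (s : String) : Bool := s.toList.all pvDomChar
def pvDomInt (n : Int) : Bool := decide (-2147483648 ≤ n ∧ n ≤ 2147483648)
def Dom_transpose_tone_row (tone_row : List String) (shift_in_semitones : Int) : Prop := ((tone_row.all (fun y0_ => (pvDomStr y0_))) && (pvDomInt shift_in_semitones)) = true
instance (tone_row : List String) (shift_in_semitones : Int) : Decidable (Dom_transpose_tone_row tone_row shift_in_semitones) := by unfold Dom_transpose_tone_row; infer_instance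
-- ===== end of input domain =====

-- B replaces A's two 12-entry name tables by letter arithmetic: the position is the semitone
-- value of the note letter plus the count of '#', and the transposed name is rebuilt from the
-- black-key test; same cost ("alternative"), equivalence proved below.

-- ===== PORT A =====
-- module constants of A
def pitchClassToPosition : PySem.Dict String Int :=
  PySem.Dict.ofList [("C", 0), ("C#", 1), ("D", 2), ("D#", 3), ("E", 4), ("F", 5),
                     ("F#", 6), ("G", 7), ("G#", 8), ("A", 9), ("A#", 10), ("B", 11)]

def positionToPitchClass : PySem.Dict Int String :=
  PySem.Dict.ofList (pitchClassToPosition.items.map (fun kv => (kv.2, kv.1)))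

-- A raises KeyError on a pitch class outside the dict; Pre_ excludes those inputs,
-- so the `.getD 0` / `.getD ""` defaults below are unreachable under Pre_.
def transpose_tone_row (tone_row : List String) (shift_in_semitones : Int) : List String :=
  tone_row.foldl
    (fun acc pitch_class =>
      let new_position := (pitchClassToPosition.get? pitch_class).getD 0 + shift_in_semitones
      let new_position := PySem.Int.mod new_position 12
      let new_pitch_class := (positionToPitchClass.get? new_position).getD ""
      acc ++ [new_pitch_class])
    []

-- ===== PORT B =====
-- B's module constants: semitone value of each natural letter, and its inverse
def naturalToPosition : PySem.Dict Char Int :=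
  PySem.Dict.ofList [('C', 0), ('D', 2), ('E', 4), ('F', 5), ('G', 7), ('A', 9), ('B', 11)]

def positionToNatural : PySem.Dict Int String :=
  PySem.Dict.ofList [(0, "C"), (2, "D"), (4, "E"), (5, "F"), (7, "G"), (9, "A"), (11, "B")]

-- B raises (KeyError/IndexError) on an empty string or a first char outside the letter dict;
-- those inputs lie outside Pre_ too, so the defaults are unreachable under Pre_.
def transpose_tone_row_alt (tone_row : List String) (shift_in_semitones : Int) : List String :=
  tone_row.foldl
    (fun result pitch_class =>
      let position := (naturalToPosition.get? ((PySem.Str.pyGet? pitch_class 0).getD ' ')).getD 0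
                        + (PySem.Str.count pitch_class "#" : Int)
      let position := PySem.Int.mod (position + shift_in_semitones) 12
      let name := if positionToNatural.contains position then
          (positionToNatural.get? position).getD ""
        else
          ((positionToNatural.get? (position - 1)).getD "") ++ "#"
      result ++ [name])
    []

-- ===== PRECONDITION & SPEC =====
-- Pre_ excludes exactly the inputs on which the Python A raises KeyError:
-- a row element that is not one of the 12 sharp-spelled pitch-class names.
def Pre_transpose_tone_row (tone_row : List String) (shift_in_semitones : Int) : Prop :=
  (tone_row.all (fun pc => pitchClassToPosition.contains pc)) = true
instance (tone_row : List String) (shift_in_semitones : Int) : Decidable (Pre_transpose_tone_row tone_row shift_in_semitones) := by unfold Pre_transpose_tone_row; infer_instance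

def pvWitness_transpose_tone_row : List String × Int := (["C", "F#", "B"], -5)

def Spec_transpose_tone_row (tone_row : List String) (shift_in_semitones : Int) (out : List String) : Prop := out = transpose_tone_row_alt tone_row shift_in_semitones
instance (tone_row : List String) (shift_in_semitones : Int) (out : List String) : Decidable (Spec_transpose_tone_row tone_row shift_in_semitones out) := by unfold Spec_transpose_tone_row; infer_instance

-- ===== CLAIM (what is proved, stated in full; the proofs are below) =====
def Claim_equal_transpose_tone_row : Prop := ∀ (tone_row : List String) (shift_in_semitones : Int), Dom_transpose_tone_row tone_row shift_in_semitones → Pre_transpose_tone_row tone_row shift_in_semitones → Spec_transpose_tone_row tone_row shift_in_semitones (transpose_tone_row tone_row shift_in_semitones)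


-- ===== LEMMAS AND PROOFS =====

-- the two per-element name computations agree on every residue 0 ≤ m < 12
theorem name_of_mod_eq (m : Int) (h0 : 0 ≤ m) (h12 : m < 12) :
    (positionToPitchClass.get? m).getD "" =
      (if positionToNatural.contains m then (positionToNatural.get? m).getD ""
       else ((positionToNatural.get? (m - 1)).getD "") ++ "#") := by
  interval_cases m <;> decide

-- on each valid pitch class the two per-element functions agree
theorem elt_eq (s : Int) (pc : String) (h : pitchClassToPosition.contains pc = true) :
    (positionToPitchClass.get? (PySem.Int.mod ((pitchClassToPosition.get? pc).getD 0 + s) 12)).getD ""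
      = (let position := (naturalToPosition.get? ((PySem.Str.pyGet? pc 0).getD ' ')).getD 0
                           + (PySem.Str.count pc "#" : Int)
         let position := PySem.Int.mod (position + s) 12
         if positionToNatural.contains position then (positionToNatural.get? position).getD ""
         else ((positionToNatural.get? (position - 1)).getD "") ++ "#") := by
  have hk : pitchClassToPosition.keys = ["C", "C#", "D", "D#", "E", "F", "F#", "G", "G#", "A", "A#", "B"] := by decide
  have hmem : pc ∈ ["C", "C#", "D", "D#", "E", "F", "F#", "G", "G#", "A", "A#", "B"] := by
    rw [PySem.Dict.contains_eq_decide_mem_keys, hk] at h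
    simpa using h
  have key : ∀ c : Int, 0 ≤ c → c < 12 →
      (positionToPitchClass.get? (PySem.Int.mod (c + s) 12)).getD "" =
        (if positionToNatural.contains (PySem.Int.mod (c + s) 12) then
           (positionToNatural.get? (PySem.Int.mod (c + s) 12)).getD ""
         else ((positionToNatural.get? (PySem.Int.mod (c + s) 12 - 1)).getD "") ++ "#") := by
    intro c _ _
    exact name_of_mod_eq _ (PySem.Int.mod_nonneg _ (by omega)) (PySem.Int.mod_lt _ (by omega))
  fin_cases hmem <;>
    · simp only []
      first
      | exact key 0 (by omega) (by omega) | exact key 1 (by omega) (by omega)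
      | exact key 2 (by omega) (by omega) | exact key 3 (by omega) (by omega)
      | exact key 4 (by omega) (by omega) | exact key 5 (by omega) (by omega)
      | exact key 6 (by omega) (by omega) | exact key 7 (by omega) (by omega)
      | exact key 8 (by omega) (by omega) | exact key 9 (by omega) (by omega)
      | exact key 10 (by omega) (by omega) | exact key 11 (by omega) (by omega)

theorem transpose_tone_row_eq (tone_row : List String) (s : Int)
    (h : Pre_transpose_tone_row tone_row s) :
    transpose_tone_row tone_row s = transpose_tone_row_alt tone_row s := by
  unfold transpose_tone_row transpose_tone_row_alt
  rw [PySem.List.foldl_append_singleton_eq_map, PySem.List.foldl_append_singleton_eq_map]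
  apply List.map_congr_left
  intro pc hpc
  have hc : pitchClassToPosition.contains pc = true := by
    unfold Pre_transpose_tone_row at h
    simpa using List.all_eq_true.mp h pc hpc
  exact elt_eq s pc hc

-- ===== VERDICT (by name: the statement is the Claim_ definition above) =====
theorem transpose_tone_row_spec : Claim_equal_transpose_tone_row := by
  intro tone_row s _ hpre
  exact transpose_tone_row_eq tone_row s hpre
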